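-- pv_equiv track=rewrite | github.com/joshanashakya/dissertation | workspace/dataset/java-python/GeeksForGeeks/3102/A/2.py | check
-- ===== SOURCE A (Python) =====
-- def check(s, strr):
--
--     chars = s
--
--     # Valid characters check
--     for c in chars:
--
--         if c not in strr:
--             return False
--
--     # Nonrepetitive check
--     for i in range(len(chars)-1):
--         if (chars[i] == chars[i + 1]):
--             return False
--
--     return True
-- ===== SOURCE B (Python) =====
-- def check(s, strr):
--     prev = None
--     for c in s:
--         if c not in strr:
--             return False
--         if c == prev:
--             return False
--         prev = c
--     return True
-- ===== Notes on version B (the rewrite author's own statement) =====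
-- stated objective: simpler
-- what changed: A's two separate passes (a membership pass over all of s, then an index-based adjacent-duplicate pass) are fused into one single pass over s carrying the previous character, with no indexing; the fused loop stops at the first violation of either condition.
import Mathlib
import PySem

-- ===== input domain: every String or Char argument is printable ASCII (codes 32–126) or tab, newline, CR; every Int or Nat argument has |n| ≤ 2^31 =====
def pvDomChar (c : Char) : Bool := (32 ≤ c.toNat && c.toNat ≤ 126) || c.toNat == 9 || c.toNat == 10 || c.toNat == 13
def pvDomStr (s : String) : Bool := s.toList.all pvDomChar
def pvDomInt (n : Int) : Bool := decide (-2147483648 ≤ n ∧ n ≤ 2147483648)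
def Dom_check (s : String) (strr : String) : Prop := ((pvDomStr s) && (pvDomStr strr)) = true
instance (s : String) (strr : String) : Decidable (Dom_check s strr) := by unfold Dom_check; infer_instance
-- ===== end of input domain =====

-- B fuses A's two passes (membership pass, then index-based adjacent-duplicate pass)
-- into one pass over s carrying the previous character; objective: simpler, same cost.

-- ===== PORT A =====
-- first loop: for c in chars: if c not in strr: return False
def checkLoop1 (strr : List Char) : List Char → Bool
  | [] => true
  | c :: cs => if PySem.Chars.isIn [c] strr = false then false else checkLoop1 strr cs

-- second loop: for i in range(len(chars)-1): if chars[i] == chars[i+1]: return False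
def checkLoop2 (chars : List Char) : List Int → Bool
  | [] => true
  | i :: rest =>
      if PySem.List.pyGet? chars i == PySem.List.pyGet? chars (i + 1) then false
      else checkLoop2 chars rest

def check (s : String) (strr : String) : Bool :=
  let chars := s.toList
  if checkLoop1 strr.toList chars = false then false
  else checkLoop2 chars (PySem.List.pyRange 0 ((chars.length : Int) - 1) 1)

-- ===== PORT B =====
-- single pass carrying prev (None initially)
def checkAltLoop (strr : List Char) : Option Char → List Char → Bool
  | _, [] => true
  | prev, c :: cs =>
      if PySem.Chars.isIn [c] strr = false then false
      else if some c == prev then false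
      else checkAltLoop strr (some c) cs

def check_alt (s : String) (strr : String) : Bool :=
  checkAltLoop strr.toList none s.toList

-- ===== PRECONDITION & SPEC =====
def Spec_check (s : String) (strr : String) (out : Bool) : Prop := out = check_alt s strr
instance (s : String) (strr : String) (out : Bool) : Decidable (Spec_check s strr out) := by unfold Spec_check; infer_instance

-- ===== CLAIM (what is proved, stated in full; the proofs are below) =====
def Claim_equal_check : Prop := ∀ (s : String) (strr : String), Dom_check s strr → Spec_check s strr (check s strr)

-- ===== LEMMAS AND PROOFS =====

-- characterisations used by both sides
def allValid (strr : List Char) (chars : List Char) : Bool :=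
  chars.all (fun c => PySem.Chars.isIn [c] strr)

def adjOK : List Char → Bool
  | [] => true
  | [_] => true
  | a :: b :: r => (!(a == b)) && adjOK (b :: r)

theorem checkLoop1_eq (strr : List Char) (chars : List Char) :
    checkLoop1 strr chars = allValid strr chars := by
  induction chars with
  | nil => rfl
  | cons c cs ih =>
      simp only [checkLoop1, allValid, List.all_cons] at *
      by_cases h : PySem.Chars.isIn [c] strr = false <;> simp [h, ih]

theorem checkAltLoop_eq (strr : List Char) (chars : List Char) :
    ∀ prev : Option Char,
      checkAltLoop strr prev chars = (allValid strr chars && adjOK (prev.toList ++ chars)) := by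
  induction chars with
  | nil => intro prev; cases prev <;> simp [checkAltLoop, allValid, adjOK]
  | cons c cs ih =>
      intro prev
      simp only [checkAltLoop, allValid, List.all_cons]
      by_cases h : PySem.Chars.isIn [c] strr = false
      · simp [h]
      · simp only [h]
        cases prev with
        | none =>
            simp only [Option.toList, List.nil_append]
            have := ih (some c)
            simp only [Option.toList, List.singleton_append] at this
            simp [this, allValid]
        | some p =>
            by_cases he : c = p
            · subst he; simp [adjOK]
            · have hne : (some c == some p) = false := by simp [he]
              simp only [hne]
              have := ih (some c)
              simp only [Option.toList, List.singleton_append] at this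
              simp only [this, allValid, Option.toList, List.singleton_append, adjOK]
              have : (p == c) = false := by simp [Ne.symm he]
              by_cases hv : PySem.Chars.isIn [c] strr <;> simp_all [Bool.and_comm, Bool.and_assoc]

theorem adjOK_iff (chars : List Char) :
    adjOK chars = true ↔ ∀ i, (h : i + 1 < chars.length) → chars[i] ≠ chars[i+1] := by
  induction chars with
  | nil => simp [adjOK]
  | cons a cs ih =>
      cases cs with
      | nil => simp [adjOK]
      | cons b r =>
          constructor
          · intro h i hi
            simp only [adjOK, Bool.and_eq_true, Bool.not_eq_true'] at h
            cases i with
            | zero => simpa using (by simpa using h.1 : a ≠ b)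
            | succ j =>
                have := (ih.mp h.2) j (by simpa using hi)
                simpa using this
          · intro h
            simp only [adjOK, Bool.and_eq_true, Bool.not_eq_true']
            constructor
            · have := h 0 (by simp)
              simpa using this
            · exact ih.mpr (fun j hj => by
                have := h (j+1) (by simpa using hj)
                simpa using this)

theorem checkLoop2_all (chars : List Char) (idxs : List Int) :
    checkLoop2 chars idxs
      = idxs.all (fun i => !(PySem.List.pyGet? chars i == PySem.List.pyGet? chars (i + 1))) := by
  induction idxs with
  | nil => rfl
  | cons i rest ih =>
      simp only [checkLoop2, List.all_cons]
      by_cases h : PySem.List.pyGet? chars i == PySem.List.pyGet? chars (i + 1) <;> simp [h, ih]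

theorem checkLoop2_eq (chars : List Char) :
    checkLoop2 chars (PySem.List.pyRange 0 ((chars.length : Int) - 1) 1) = adjOK chars := by
  rw [checkLoop2_all]
  rw [Bool.eq_iff_iff, List.all_eq_true, adjOK_iff]
  constructor
  · intro h i hi
    have hmem : (i : Int) ∈ PySem.List.pyRange 0 ((chars.length : Int) - 1) 1 := by
      rw [PySem.List.mem_pyRange_one]; omega
    have := h _ hmem
    have h1 : PySem.List.pyGet? chars (i : Int) = some chars[i] := by
      have := PySem.List.pyGet?_eq_some_getElem (xs := chars) (i := (i:Int)) (by omega)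
        (by exact_mod_cast (by omega : (i:Int) < (chars.length:Int)))
      exact this
    have h2 : PySem.List.pyGet? chars ((i : Int) + 1) = some chars[i+1] := by
      have := PySem.List.pyGet?_eq_some_getElem (xs := chars) (i := (i:Int)+1) (by omega)
        (by exact_mod_cast (by omega : ((i:Int)+1) < (chars.length:Int)))
      simpa using this
    rw [h1, h2] at this
    simp only [Bool.not_eq_true', beq_eq_false_iff_ne, ne_eq, Option.some.injEq] at this
    exact this
  · intro h i hmem
    rw [PySem.List.mem_pyRange_one] at hmem
    obtain ⟨h0, hlt⟩ := hmem
    have hi1 : i.toNat + 1 < chars.length := by omega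
    have hd := h i.toNat hi1
    have h1 : PySem.List.pyGet? chars i = some chars[i.toNat] :=
      PySem.List.pyGet?_eq_some_getElem (xs := chars) (i := i) h0 (by omega)
    have h2 : PySem.List.pyGet? chars (i + 1) = some chars[i.toNat + 1] := by
      have := PySem.List.pyGet?_eq_some_getElem (xs := chars) (i := i + 1) (by omega) (by omega)
      have ht : (i + 1).toNat = i.toNat + 1 := by omega
      simpa [ht] using this
    rw [h1, h2]
    simpa using hd

-- ===== VERDICT (by name: the statement is the Claim_ definition above) =====
theorem check_spec : Claim_equal_check := by
  intro s strr _
  unfold Spec_check check check_alt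
  rw [checkAltLoop_eq]
  simp only [Option.toList, List.nil_append]
  rw [checkLoop1_eq, checkLoop2_eq]
  by_cases h : allValid strr.toList s.toList <;> simp [h]
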